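-- pv_equiv track=rewrite | github.com/fredyGabriel/crackseg | tests/utils/unified_testing/core.py | validate_expected_state
-- ===== SOURCE A (Python) =====
-- from typing import Any
--
-- def validate_expected_state(
--     expected: dict[str, Any], actual: dict[str, Any]
-- ) -> bool:
--     """Validate expected state against actual state."""
--     for key, expected_value in expected.items():
--         if key not in actual:
--             return False
--         if actual[key] != expected_value:
--             return False
--     return True
-- ===== SOURCE B (Python) =====
-- def validate_expected_state(expected, actual):
--     """Validate expected state against actual state."""
--     # Overlay expected onto actual; the merge changes nothing iff
--     # every (key, value) of expected already holds in actual.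
--     merged = {**actual, **expected}
--     return merged == actual
-- ===== Notes on version B (the rewrite author's own statement) =====
-- stated objective: alternative
-- what changed: Instead of looping over expected with per-key lookups and early returns, B builds the merged dict {**actual, **expected} and returns whether it equals actual (the overlay changes nothing iff expected is a sub-state of actual).
import Mathlib
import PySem

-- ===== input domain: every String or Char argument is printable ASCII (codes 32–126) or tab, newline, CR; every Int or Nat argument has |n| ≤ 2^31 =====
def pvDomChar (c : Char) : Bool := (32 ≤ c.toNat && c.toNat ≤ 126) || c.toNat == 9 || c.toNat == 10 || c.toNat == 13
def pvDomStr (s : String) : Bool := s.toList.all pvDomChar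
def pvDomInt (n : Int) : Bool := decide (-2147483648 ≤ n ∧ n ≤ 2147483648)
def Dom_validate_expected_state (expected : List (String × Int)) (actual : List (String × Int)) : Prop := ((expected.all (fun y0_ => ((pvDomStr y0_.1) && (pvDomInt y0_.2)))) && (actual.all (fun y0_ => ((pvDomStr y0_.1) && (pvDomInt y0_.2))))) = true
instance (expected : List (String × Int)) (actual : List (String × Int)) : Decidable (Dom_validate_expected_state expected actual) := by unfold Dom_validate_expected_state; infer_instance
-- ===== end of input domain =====

-- B builds the merged dict {**actual, **expected} and tests whole-dict equality with actual,
-- instead of A's per-key lookup loop with early returns; objective: alternative.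

-- ===== PORT A =====
-- the 'for key, expected_value in expected.items(): …' loop with its two early returns
def vesLoopA (a : PySem.Dict String Int) : List (String × Int) → Bool
  | [] => true
  | (k, v) :: rest =>
    if a.contains k = false then false
    else if a.get? k ≠ some v then false
    else vesLoopA a rest

def validate_expected_state (expected : List (String × Int)) (actual : List (String × Int)) : Bool :=
  vesLoopA (PySem.Dict.ofList actual) (PySem.Dict.ofList expected).items

-- ===== PORT B =====
-- Python dict equality d1 == d2: same number of keys and every item of d1 looks up equal in d2
-- (order-insensitive, exactly CPython's dict __eq__ semantics given unique keys).
def pyDictEq (d1 d2 : PySem.Dict String Int) : Bool :=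
  d1.size == d2.size && d1.items.all (fun kv => d2.get? kv.1 == some kv.2)

-- merged = {**actual, **expected}: start from actual, insert each item of expected in order
def validate_expected_state_alt (expected : List (String × Int)) (actual : List (String × Int)) : Bool :=
  let a := PySem.Dict.ofList actual
  let merged := (PySem.Dict.ofList expected).items.foldl (fun d kv => d.insert kv.1 kv.2) a
  pyDictEq merged a

-- ===== PRECONDITION & SPEC =====
def Spec_validate_expected_state (expected : List (String × Int)) (actual : List (String × Int)) (out : Bool) : Prop := out = validate_expected_state_alt expected actual
instance (expected : List (String × Int)) (actual : List (String × Int)) (out : Bool) : Decidable (Spec_validate_expected_state expected actual out) := by unfold Spec_validate_expected_state; infer_instance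

-- ===== CLAIM =====
def Claim_equal_validate_expected_state : Prop := ∀ (expected : List (String × Int)) (actual : List (String × Int)), Dom_validate_expected_state expected actual → Spec_validate_expected_state expected actual (validate_expected_state expected actual)

-- ===== LEMMAS AND PROOFS =====

-- A's loop is the pointwise check 'a.get? k = some v' over the item list
theorem vesLoopA_eq_all (a : PySem.Dict String Int) :
    ∀ (l : List (String × Int)), vesLoopA a l = l.all (fun kv => a.get? kv.1 == some kv.2) := by
  intro l
  induction l with
  | nil => rfl
  | cons kv rest ih =>
    obtain ⟨k, v⟩ := kv
    simp only [vesLoopA, List.all_cons, ih]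
    by_cases hg : a.get? k = some v
    · have hc : a.contains k = true := by
        rw [PySem.Dict.contains_eq_isSome_get?, hg]; rfl
      rw [if_neg (by simp [hc]), if_neg (by simp [hg])]
      simp [hg]
    · by_cases hc : a.contains k = true
      · rw [if_neg (by simp [hc]), if_pos hg]
        simp [hg]
      · have hn : a.get? k = none := by
          rw [PySem.Dict.get?_eq_none_iff_contains]
          exact eq_false_of_ne_true hc
        rw [if_pos (eq_false_of_ne_true hc)]
        simp [hn]

-- inserting an already-present (key, value) pair leaves the dict unchanged
theorem insert_eq_self_of_get? (d : PySem.Dict String Int) (k : String) (v : Int)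
    (hnd : d.keys.Nodup) (hg : d.get? k = some v) : d.insert k v = d := by
  have hc : d.contains k = true := by
    rw [PySem.Dict.contains_eq_isSome_get?, hg]; rfl
  apply PySem.Dict.ext
  rw [PySem.Dict.items_insert_of_contains d v hc]
  have : ∀ p ∈ d.items, (if p.1 == k then (k, v) else p) = p := by
    intro p hp
    by_cases h : p.1 = k
    · obtain ⟨pk, pv⟩ := p
      simp only at h; subst h
      have := PySem.Dict.get?_of_mem_items d hp hnd
      rw [hg] at this
      simp [Option.some.injEq] at this
      simp [this]
    · simp [h]
  rw [List.map_congr_left this]; simp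

-- a foldl of inserts over keys not containing k leaves get? k unchanged
theorem get?_foldl_insert_not_mem (k : String) :
    ∀ (l : List (String × Int)) (d : PySem.Dict String Int), k ∉ l.map (·.1) →
      (l.foldl (fun d kv => d.insert kv.1 kv.2) d).get? k = d.get? k := by
  intro l
  induction l with
  | nil => intro d _; rfl
  | cons kv rest ih =>
    intro d h
    simp only [List.map_cons, List.mem_cons, not_or] at h
    simp only [List.foldl_cons]
    rw [ih _ h.2, PySem.Dict.get?_insert_of_ne d kv.2 h.1]

-- a foldl of inserts over a fst-nodup list makes each listed pair visible
theorem get?_foldl_insert_mem (k : String) (v : Int) :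
    ∀ (l : List (String × Int)) (d : PySem.Dict String Int),
      (l.map (·.1)).Nodup → (k, v) ∈ l →
      (l.foldl (fun d kv => d.insert kv.1 kv.2) d).get? k = some v := by
  intro l
  induction l with
  | nil => intro d _ h; cases h
  | cons kv rest ih =>
    intro d hnd hmem
    simp only [List.map_cons, List.nodup_cons] at hnd
    simp only [List.foldl_cons]
    rcases List.mem_cons.mp hmem with h | h
    · subst h
      have : k ∉ rest.map (·.1) := hnd.1
      rw [get?_foldl_insert_not_mem k rest _ this, PySem.Dict.get?_insert_self]
    · exact ih _ hnd.2 h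

-- inserting pairs that all already hold in a is a no-op
theorem foldl_insert_noop (a : PySem.Dict String Int) (haa : a.keys.Nodup) :
    ∀ (l : List (String × Int)), (∀ kv ∈ l, a.get? kv.1 = some kv.2) →
      l.foldl (fun d kv => d.insert kv.1 kv.2) a = a := by
  intro l
  induction l with
  | nil => intro _; rfl
  | cons kv rest ih =>
    intro h
    simp only [List.foldl_cons]
    rw [insert_eq_self_of_get? a kv.1 kv.2 haa (h kv (by simp))]
    exact ih (fun p hp => h p (by simp [hp]))

-- B's merge-then-compare equals the pointwise check over expected's items
theorem pyDictEq_foldl (e a : PySem.Dict String Int)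
    (hea : e.keys.Nodup) (haa : a.keys.Nodup) :
    pyDictEq (e.items.foldl (fun d kv => d.insert kv.1 kv.2) a) a
      = e.items.all (fun kv => a.get? kv.1 == some kv.2) := by
  have hnd : (e.items.map (·.1)).Nodup := hea
  by_cases hall : e.items.all (fun kv => a.get? kv.1 == some kv.2) = true
  · -- every insert is a no-op, so merged = a and pyDictEq a a = true
    rw [hall]
    have hm : e.items.foldl (fun d kv => d.insert kv.1 kv.2) a = a :=
      foldl_insert_noop a haa e.items (by
        intro kv hkv
        have := List.all_eq_true.mp hall kv hkv
        simpa using this)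
    rw [hm]
    unfold pyDictEq
    simp only [beq_self_eq_true, Bool.true_and]
    rw [List.all_eq_true]
    intro kv hkv
    obtain ⟨k, v⟩ := kv
    simp [PySem.Dict.get?_of_mem_items a hkv haa]
  · -- a witness pair disagrees: it appears in merged's items but fails lookup in a
    rw [eq_false_of_ne_true hall]
    simp only [List.all_eq_true, not_forall] at hall
    obtain ⟨kv, hkv, hbad⟩ := hall
    obtain ⟨k, v⟩ := kv
    have hbad' : a.get? k ≠ some v := by simpa using hbad
    have hget : (e.items.foldl (fun d kv => d.insert kv.1 kv.2) a).get? k = some v :=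
      get?_foldl_insert_mem k v e.items a hnd hkv
    have hitem : (k, v) ∈ (e.items.foldl (fun d kv => d.insert kv.1 kv.2) a).items :=
      PySem.Dict.mem_items_of_get?_eq_some _ hget
    unfold pyDictEq
    rw [Bool.and_eq_false_iff]
    right
    rw [List.all_eq_false]
    exact ⟨(k, v), hitem, by simpa using hbad'⟩

-- ===== VERDICT =====
theorem validate_expected_state_spec : Claim_equal_validate_expected_state := by
  intro expected actual _
  unfold Spec_validate_expected_state validate_expected_state validate_expected_state_alt
  rw [vesLoopA_eq_all,
    pyDictEq_foldl _ _ (PySem.Dict.nodup_keys_ofList expected) (PySem.Dict.nodup_keys_ofList actual)]
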